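-- pv_equiv track=rewrite | github.com/AnirudhBharti/Algorithms | Algorithms/DP/MaximimAstoPrintKeyBoard.py | MaximumAsToPrint
-- ===== SOURCE A (Python) =====
-- def MaximumAsToPrint(N):
--
--     if N <= 6:
--         return N
--
--     screens = [0]*N
--
--     for i in range(1, N):
--         screens[i-1] = i
--
--     for n in range(7, N+1):
--         screens[n-1] = 0
--         for breakpoint in range(n-3, 0, -1):
--             curr = (n-breakpoint-1)*screens[breakpoint-1]
--             if curr > screens[n-1]:
--                 screens[n-1] = curr
--
--     return screens[N-1]
-- ===== SOURCE B (Python) =====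
-- # Closed form: for N >= 16 the optimum repeats with period 5 (multiply by 4),
-- # so answer = base[r] * 4**q where N = 11 + r + 5*q.
-- _BASE = [1, 2, 3, 4, 5, 6, 9, 12, 16, 20, 27, 36, 48, 64, 81]  # values for N = 1..15
--
-- def MaximumAsToPrint(N):
--     if N <= 6:
--         return N
--     if N <= 15:
--         return _BASE[N - 1]
--     q, r = divmod(N - 11, 5)
--     return _BASE[10 + r] * 4 ** q
-- ===== Notes on version B (the rewrite author's own statement) =====
-- stated objective: faster
-- what changed: Replaced the O(N^2) DP over all breakpoints by the closed form: for N >= 16 the optimum satisfies f(N) = 4*f(N-5), so B returns base[r] * 4**q from a 15-entry table (N = 11 + r + 5q).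
import Mathlib
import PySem

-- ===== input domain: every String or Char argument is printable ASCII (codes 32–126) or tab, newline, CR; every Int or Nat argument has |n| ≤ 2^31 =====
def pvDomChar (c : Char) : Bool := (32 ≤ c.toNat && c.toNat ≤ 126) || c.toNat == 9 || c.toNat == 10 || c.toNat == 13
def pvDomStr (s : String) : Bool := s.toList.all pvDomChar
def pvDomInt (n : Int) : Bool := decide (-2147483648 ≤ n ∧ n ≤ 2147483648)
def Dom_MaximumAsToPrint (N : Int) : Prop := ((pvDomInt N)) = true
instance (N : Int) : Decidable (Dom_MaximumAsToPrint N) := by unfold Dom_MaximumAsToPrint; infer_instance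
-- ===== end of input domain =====

-- B replaces A's O(N^2) double loop by the closed form of the copy-paste DP:
-- for N ≥ 16 the optimum satisfies f(N) = 4·f(N-5), so B returns a table value times a power of 4.

-- ===== PORT A =====
def MaximumAsToPrint (N : Int) : Int :=
  if N ≤ 6 then N
  else
    -- screens = [0]*N
    let screens0 : List Int := List.replicate N.toNat 0
    -- for i in range(1, N): screens[i-1] = i   (all indices here are nonnegative and in range)
    let screens1 := (PySem.List.pyRange 1 N 1).foldl
      (fun s i => PySem.List.pySetD s (i-1) i) screens0
    -- for n in range(7, N+1): screens[n-1] = 0; inner loop over breakpoint in range(n-3, 0, -1)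
    let screens2 := (PySem.List.pyRange 7 (N+1) 1).foldl
      (fun s n =>
        (PySem.List.pyRange (n-3) 0 (-1)).foldl
          (fun s2 bp =>
            let curr := (n - bp - 1) * PySem.List.pyGetD s2 (bp-1) 0
            if curr > PySem.List.pyGetD s2 (n-1) 0 then PySem.List.pySetD s2 (n-1) curr else s2)
          (PySem.List.pySetD s (n-1) 0)) screens1
    PySem.List.pyGetD screens2 (N-1) 0

-- ===== PORT B =====
-- _BASE table of Source B (values for N = 1..15)
def pvBase : List Int := [1,2,3,4,5,6,9,12,16,20,27,36,48,64,81]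

def MaximumAsToPrint_alt (N : Int) : Int :=
  if N ≤ 6 then N
  else if N ≤ 15 then PySem.List.pyGetD pvBase (N-1) 0
  else
    -- q, r = divmod(N - 11, 5); _BASE[10 + r] * 4 ** q   (4 ** q exact here since q ≥ 1)
    let q := PySem.Int.floordiv (N - 11) 5
    let r := PySem.Int.mod (N - 11) 5
    PySem.List.pyGetD pvBase (10 + r) 0 * 4 ^ q.toNat

-- ===== PRECONDITION & SPEC =====
def Spec_MaximumAsToPrint (N : Int) (out : Int) : Prop := out = MaximumAsToPrint_alt N
instance (N : Int) (out : Int) : Decidable (Spec_MaximumAsToPrint N out) := by unfold Spec_MaximumAsToPrint; infer_instance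

-- ===== CLAIM (what is proved, stated in full; the proofs are below) =====
def Claim_equal_MaximumAsToPrint : Prop := ∀ (N : Int), Dom_MaximumAsToPrint N → Spec_MaximumAsToPrint N (MaximumAsToPrint N)

-- ===== LEMMAS AND PROOFS =====


-- running max fold
def pvImax {α : Type} (c : α → Int) (L : List α) (v : Int) : Int :=
  L.foldl (fun v b => if c b > v then c b else v) v

def pvNext (prev : List Int) : Int :=
  let n : Nat := prev.length + 1
  if n ≤ 6 then (n : Int)
  else pvImax (fun b : Nat => ((n : Int) - (b : Int) - 1) * prev.getD (b-1) 0)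
              ((List.range (n-3)).map (· + 1)) 0

def pvTab : Nat → List Int
  | 0 => []
  | n+1 => pvTab n ++ [pvNext (pvTab n)]

def pvF (n : Nat) : Int := (pvTab n).getD (n-1) 0


-- ===== pvImax lemmas =====
theorem pvImax_ge_init {α : Type} (c : α → Int) (L : List α) (v : Int) : v ≤ pvImax c L v := by
  induction L generalizing v with
  | nil => simp [pvImax]
  | cons b L ih =>
    simp only [pvImax, List.foldl_cons]
    refine le_trans ?_ (ih _)
    split <;> omega

theorem pvImax_ge_mem {α : Type} (c : α → Int) (L : List α) (v : Int) {b : α} (hb : b ∈ L) :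
    c b ≤ pvImax c L v := by
  induction L generalizing v with
  | nil => simp at hb
  | cons a L ih =>
    simp only [pvImax, List.foldl_cons]
    rcases List.mem_cons.1 hb with h | h
    · subst h
      refine le_trans ?_ (pvImax_ge_init c L _)
      split <;> omega
    · exact ih _ h

theorem pvImax_cases {α : Type} (c : α → Int) (L : List α) (v : Int) :
    pvImax c L v = v ∨ ∃ b ∈ L, pvImax c L v = c b := by
  induction L generalizing v with
  | nil => left; simp [pvImax]
  | cons a L ih =>
    simp only [pvImax, List.foldl_cons]
    rcases ih (if c a > v then c a else v) with h | ⟨b, hb, h⟩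
    · by_cases hc : c a > v
      · right; exact ⟨a, List.mem_cons_self .., by simp [pvImax] at h ⊢; rw [h]; simp [hc]⟩
      · left; simp [pvImax] at h ⊢; rw [h]; simp [hc]
    · right; exact ⟨b, List.mem_cons_of_mem _ hb, h⟩

theorem pvImax_le {α : Type} {c : α → Int} {L : List α} {v M : Int} (hv : v ≤ M)
    (h : ∀ b ∈ L, c b ≤ M) : pvImax c L v ≤ M := by
  rcases pvImax_cases c L v with hc | ⟨b, hb, hc⟩
  · omega
  · rw [hc]; exact h b hb

theorem pvImax_congr {α : Type} {c c' : α → Int} {L : List α} (v : Int)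
    (h : ∀ b ∈ L, c b = c' b) : pvImax c L v = pvImax c' L v := by
  induction L generalizing v with
  | nil => rfl
  | cons a L ih =>
    simp only [pvImax, List.foldl_cons] at *
    rw [h a (List.mem_cons_self ..)]
    exact ih _ (fun b hb => h b (List.mem_cons_of_mem _ hb))

theorem pvImax_eq_of_mem_iff {α : Type} {c : α → Int} {L₁ L₂ : List α} (v : Int)
    (h : ∀ x, x ∈ L₁ ↔ x ∈ L₂) : pvImax c L₁ v = pvImax c L₂ v := by
  apply le_antisymm
  · exact pvImax_le (pvImax_ge_init c L₂ v) (fun b hb => pvImax_ge_mem c L₂ v ((h b).1 hb))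
  · exact pvImax_le (pvImax_ge_init c L₁ v) (fun b hb => pvImax_ge_mem c L₁ v ((h b).2 hb))

theorem pvImax_map {α β : Type} (c : β → Int) (g : α → β) (L : List α) (v : Int) :
    pvImax c (L.map g) v = pvImax (fun x => c (g x)) L v := by
  simp [pvImax, List.foldl_map]

-- ===== pvF basic lemmas =====
theorem length_pvTab (n : Nat) : (pvTab n).length = n := by
  induction n with
  | zero => rfl
  | succ n ih => simp [pvTab, ih]

theorem pvTab_getD_of_lt {m n j : Nat} (hmn : m ≤ n) (hj : j < m) :
    (pvTab n).getD j 0 = (pvTab m).getD j 0 := by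
  induction n with
  | zero => omega
  | succ n ih =>
    rcases Nat.lt_or_ge m (n+1) with h | h
    · have := ih (by omega)
      rw [← this]
      simp only [pvTab]
      rw [List.getD_eq_getElem?_getD, List.getElem?_append_left (by rw [length_pvTab]; omega),
        ← List.getD_eq_getElem?_getD]
    · have : m = n + 1 := by omega
      subst this; rfl

theorem pvF_eq_getD {b n : Nat} (hb : 1 ≤ b) (hbn : b ≤ n) :
    (pvTab n).getD (b-1) 0 = pvF b := by
  rw [pvF, pvTab_getD_of_lt hbn (by omega)]

theorem pvF_succ (n : Nat) : pvF (n+1) = pvNext (pvTab n) := by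
  simp only [pvF, pvTab, Nat.add_sub_cancel]
  rw [List.getD_eq_getElem?_getD, List.getElem?_append_right (by rw [length_pvTab]),
    length_pvTab]
  simp

theorem pvF_small {n : Nat} (h : n ≤ 6) : pvF n = (n : Int) := by
  interval_cases n <;> decide

theorem pvF_recur {n : Nat} (h : 7 ≤ n) :
    pvF n = pvImax (fun b : Nat => ((n : Int) - (b : Int) - 1) * pvF b)
      ((List.range (n-3)).map (· + 1)) 0 := by
  obtain ⟨m, rfl⟩ : ∃ m, n = m + 1 := ⟨n - 1, by omega⟩
  rw [pvF_succ, pvNext]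
  simp only [length_pvTab]
  rw [if_neg (by omega)]
  apply pvImax_congr
  intro b hb
  simp only [List.mem_map, List.mem_range] at hb
  obtain ⟨k, hk, rfl⟩ := hb
  rw [pvF_eq_getD (by omega) (by omega)]

theorem mem_bps_iff {n b : Nat} (_h : 7 ≤ n) :
    b ∈ (List.range (n-3)).map (· + 1) ↔ 1 ≤ b ∧ b ≤ n - 3 := by
  simp only [List.mem_map, List.mem_range]
  constructor
  · rintro ⟨k, hk, rfl⟩; omega
  · rintro ⟨h1, h2⟩; exact ⟨b - 1, by omega, by omega⟩

theorem pvF_pos : ∀ n : Nat, 1 ≤ n → 1 ≤ pvF n := by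
  intro n
  induction n using Nat.strong_induction_on with
  | _ n ih =>
    intro hn
    by_cases h6 : n ≤ 6
    · rw [pvF_small h6]; exact_mod_cast hn
    · rw [pvF_recur (by omega)]
      have hmem : (n - 3) ∈ (List.range (n-3)).map (· + 1) := (mem_bps_iff (by omega)).2 (by omega)
      have hle := pvImax_ge_mem (fun b : Nat => ((n : Int) - (b : Int) - 1) * pvF b)
        ((List.range (n-3)).map (· + 1)) 0 hmem
      simp only [] at hle
      have hc : ((n : Int) - ((n - 3 : Nat) : Int) - 1) = 2 := by omega
      rw [hc] at hle
      have := ih (n - 3) (by omega) (by omega)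
      omega

theorem pvR_minus : ∀ m : Nat, 6 ≤ m →
    (∀ k, 16 ≤ k → k ≤ m + 1 → pvF k = 4 * pvF (k - 5)) →
    5 * pvF m ≤ 4 * pvF (m + 1) := by
  intro m
  induction m using Nat.strong_induction_on with
  | _ m ih =>
    intro hm H
    by_cases h14 : m ≤ 14
    · interval_cases m <;> decide
    · by_cases h15 : m = 15
      · subst h15
        rw [H 16 (by omega) (by omega)]
        decide
      · -- m ≥ 16
        rw [H (m + 1) (by omega) (by omega), H m (by omega) (by omega)]
        have e1 : m + 1 - 5 = (m - 5) + 1 := by omega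
        rw [e1]
        have := ih (m - 5) (by omega) (by omega) (fun k hk hk' => H k hk (by omega))
        linarith

theorem pvR_plus : ∀ m : Nat, 11 ≤ m →
    (∀ k, 16 ≤ k → k ≤ m + 1 → pvF k = 4 * pvF (k - 5)) →
    3 * pvF (m + 1) ≤ 4 * pvF m := by
  intro m
  induction m using Nat.strong_induction_on with
  | _ m ih =>
    intro hm H
    by_cases h14 : m ≤ 14
    · interval_cases m <;> decide
    · by_cases h15 : m = 15
      · subst h15
        rw [H 16 (by omega) (by omega)]
        decide
      · rw [H (m + 1) (by omega) (by omega), H m (by omega) (by omega)]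
        have e1 : m + 1 - 5 = (m - 5) + 1 := by omega
        rw [e1]
        have := ih (m - 5) (by omega) (by omega) (fun k hk hk' => H k hk (by omega))
        linarith

theorem pvChain : ∀ (j b : Nat), 6 ≤ b →
    (∀ k, 16 ≤ k → k ≤ b + 1 + j → pvF k = 4 * pvF (k - 5)) →
    (5 + (j : Int)) * pvF b ≤ 4 * pvF (b + 1 + j) := by
  intro j
  induction j with
  | zero =>
    intro b hb H
    simpa using pvR_minus b hb (fun k hk hk' => H k hk (by omega))
  | succ j ih =>
    intro b hb H
    have ihj := ih b hb (fun k hk hk' => H k hk (by omega))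
    have hr := pvR_minus (b + 1 + j) (by omega) (fun k hk hk' => H k hk (by omega))
    have hpos := pvF_pos b (by omega)
    have hmono : pvF b ≤ pvF (b + 1 + j) := by
      have : (0:Int) ≤ (j : Int) := by positivity
      nlinarith
    have e : b + 1 + (j + 1) = (b + 1 + j) + 1 := by omega
    rw [e]
    push_cast
    nlinarith

theorem pvF_ge_two_mul : ∀ m : Nat, 10 ≤ m →
    (∀ k, 16 ≤ k → k ≤ m → pvF k = 4 * pvF (k - 5)) →
    2 * (m : Int) ≤ pvF m := by
  intro m
  induction m using Nat.strong_induction_on with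
  | _ m ih =>
    intro hm H
    by_cases h15 : m ≤ 15
    · interval_cases m <;> decide
    · rw [H m (by omega) (by omega)]
      have := ih (m - 5) (by omega) (by omega) (fun k hk hk' => H k hk (by omega))
      have : ((m - 5 : Nat) : Int) = (m : Int) - 5 := by omega
      omega

theorem pvF_period : ∀ n : Nat, 16 ≤ n → pvF n = 4 * pvF (n - 5) := by
  intro n
  induction n using Nat.strong_induction_on with
  | _ n ih =>
    intro hn
    by_cases h20 : n ≤ 20
    · interval_cases n <;> decide
    · -- n ≥ 21
      have H : ∀ k, 16 ≤ k → k ≤ n - 1 → pvF k = 4 * pvF (k - 5) :=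
        fun k hk hk' => ih k (by omega) hk
      have hpos5 := pvF_pos (n - 5) (by omega)
      rw [pvF_recur (by omega)]
      apply le_antisymm
      · apply pvImax_le (by linarith)
        intro b hb
        rw [mem_bps_iff (by omega)] at hb
        by_cases hb5 : b ≤ 5
        · -- tiny breakpoints: pvF b = b, bound via pvF (n-5) ≥ 2(n-5)
          rw [pvF_small (by omega)]
          have h2 := pvF_ge_two_mul (n - 5) (by omega) (fun k hk hk' => H k hk (by omega))
          have hc5 : ((n - 5 : Nat) : Int) = (n : Int) - 5 := by omega
          rw [hc5] at h2
          have hbn : (1 : Int) ≤ (b : Int) ∧ (b : Int) ≤ 5 := by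
            constructor <;> [exact_mod_cast hb.1; exact_mod_cast hb5]
          have hn21 : (21 : Int) ≤ (n : Int) := by omega
          nlinarith [mul_nonneg (by linarith : (0:Int) ≤ 6 - (b:Int)) (by nlinarith : (0:Int) ≤ (n:Int) - 7 - (b:Int))]
        · by_cases hmid : b ≤ n - 6
          · -- 6 ≤ b ≤ n-6 : chain of ×(5/4) steps
            have hj := pvChain (n - 6 - b) b (by omega) (fun k hk hk' => H k hk (by omega))
            have e : b + 1 + (n - 6 - b) = n - 5 := by omega
            rw [e] at hj
            have e2 : (5 + ((n - 6 - b : Nat) : Int)) = (n : Int) - (b : Int) - 1 := by omega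
            rw [e2] at hj
            exact hj
          · -- b ∈ {n-5, n-4, n-3}
            have hb3 := hb.2
            by_cases hbe : b = n - 5
            · subst hbe
              have hc : ((n : Int) - ((n - 5 : Nat) : Int) - 1) = 4 := by omega
              rw [hc]
            · by_cases hbe4 : b = n - 4
              · subst hbe4
                have hr := pvR_plus (n - 5) (by omega) (fun k hk hk' => H k hk (by omega))
                have e : n - 5 + 1 = n - 4 := by omega
                rw [e] at hr
                have hc : ((n : Int) - ((n - 4 : Nat) : Int) - 1) = 3 := by omega
                rw [hc]
                linarith
              · have hbe3 : b = n - 3 := by omega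
                subst hbe3
                have hr1 := pvR_plus (n - 4) (by omega) (fun k hk hk' => H k hk (by omega))
                have hr2 := pvR_plus (n - 5) (by omega) (fun k hk hk' => H k hk (by omega))
                have e1 : n - 4 + 1 = n - 3 := by omega
                have e2 : n - 5 + 1 = n - 4 := by omega
                rw [e1] at hr1; rw [e2] at hr2
                have hc : ((n : Int) - ((n - 3 : Nat) : Int) - 1) = 2 := by omega
                rw [hc]
                linarith
      · have hmem : (n - 5) ∈ (List.range (n-3)).map (· + 1) := (mem_bps_iff (by omega)).2 (by omega)
        have hle := pvImax_ge_mem (fun b : Nat => ((n : Int) - (b : Int) - 1) * pvF b)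
          ((List.range (n-3)).map (· + 1)) 0 hmem
        simp only [] at hle
        have hc : ((n : Int) - ((n - 5 : Nat) : Int) - 1) = 4 := by omega
        rw [hc] at hle
        exact hle

theorem pvF_closed (q r : Nat) (hr : r ≤ 4) : pvF (11 + r + 5 * q) = pvF (11 + r) * 4 ^ q := by
  induction q with
  | zero => simp
  | succ q ih =>
    have h16 : 16 ≤ 11 + r + 5 * (q + 1) := by omega
    have e : 11 + r + 5 * (q + 1) - 5 = 11 + r + 5 * q := by omega
    rw [pvF_period _ h16, e, ih, pow_succ]
    ring

theorem B_eq_pvF (N : Int) (h1 : 1 ≤ N) : MaximumAsToPrint_alt N = pvF N.toNat := by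
  rw [MaximumAsToPrint_alt]
  by_cases h6 : N ≤ 6
  · rw [if_pos h6, pvF_small (by omega)]
    omega
  · rw [if_neg h6]
    by_cases h15 : N ≤ 15
    · rw [if_pos h15]
      interval_cases N <;> decide
    · rw [if_neg h15]
      have h5 : (0:Int) < 5 := by norm_num
      have hq := PySem.Int.floordiv_mul_add_mod (N - 11) 5
      have hmod : PySem.Int.mod (N - 11) 5 = (N - 11) % 5 := PySem.Int.mod_eq_emod_of_pos h5
      have hr0 : 0 ≤ PySem.Int.mod (N - 11) 5 := by rw [hmod]; exact Int.emod_nonneg _ (by norm_num)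
      have hr5 : PySem.Int.mod (N - 11) 5 < 5 := by rw [hmod]; exact Int.emod_lt_of_pos _ h5
      set q := PySem.Int.floordiv (N - 11) 5 with hqdef
      set r := PySem.Int.mod (N - 11) 5 with hrdef
      have hq1 : 1 ≤ q := by nlinarith
      have hNt : N.toNat = 11 + r.toNat + 5 * q.toNat := by omega
      rw [hNt, pvF_closed q.toNat r.toNat (by omega)]
      have : PySem.List.pyGetD pvBase (10 + r) 0 = pvF (11 + r.toNat) := by
        interval_cases r <;> decide
      show PySem.List.pyGetD pvBase (10 + r) 0 * 4 ^ q.toNat = pvF (11 + r.toNat) * 4 ^ q.toNat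
      rw [this]

theorem pvGetD_set (s : List Int) (i j : Nat) (v : Int) (hi : i < s.length) :
    (s.set i v).getD j 0 = if j = i then v else s.getD j 0 := by
  rw [List.getD_eq_getElem?_getD, List.getD_eq_getElem?_getD, List.getElem?_set]
  by_cases h : i = j
  · subst h; simp [hi]
  · rw [if_neg h, if_neg (fun hh => h hh.symm)]

theorem pvSet_getD_self (s : List Int) (i : Nat) (hi : i < s.length) :
    s.set i (s.getD i 0) = s := by
  apply List.ext_getElem?
  intro j
  rw [List.getElem?_set]
  split_ifs with h
  · subst h; simp [List.getD_eq_getElem?_getD, hi]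
  · rfl

theorem pvGetD_int (s : List Int) (i : Int) (hi : 0 ≤ i) :
    PySem.List.pyGetD s i 0 = s.getD i.toNat 0 := by
  conv_lhs => rw [show i = ((i.toNat : Nat) : Int) by omega]
  rw [PySem.List.pyGetD_natCast]

theorem pvSetD_int (s : List Int) (i : Int) (v : Int) (hi : 0 ≤ i) :
    PySem.List.pySetD s i v = s.set i.toNat v := PySem.List.pySetD_of_nonneg s v hi

theorem pvStage1 (N : Int) (h7 : 7 ≤ N) :
    ∀ (k : Nat) (a : Int), 1 ≤ a → (N - a).toNat = k → ∀ s : List Int, s.length = N.toNat →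
    (((PySem.List.pyRange a N 1).foldl (fun s i => PySem.List.pySetD s (i-1) i) s).length = N.toNat ∧
     ∀ j : Nat, j < N.toNat →
       ((PySem.List.pyRange a N 1).foldl (fun s i => PySem.List.pySetD s (i-1) i) s).getD j 0 =
         if a ≤ (j:Int)+1 ∧ (j:Int)+1 ≤ N-1 then ((j:Int)+1) else s.getD j 0) := by
  intro k
  induction k with
  | zero =>
    intro a ha hk s hs
    rw [PySem.List.pyRange_one_eq_nil (by omega)]
    simp only [List.foldl_nil]
    refine ⟨hs, fun j hj => ?_⟩
    rw [if_neg (by omega)]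
  | succ k ih =>
    intro a ha hk s hs
    rw [PySem.List.pyRange_one_cons (by omega)]
    simp only [List.foldl_cons]
    have hset : PySem.List.pySetD s (a-1) a = s.set (a-1).toNat a := pvSetD_int s (a-1) a (by omega)
    have hlen' : (s.set (a-1).toNat a).length = N.toNat := by rw [List.length_set]; exact hs
    obtain ⟨hl, hg⟩ := ih (a+1) (by omega) (by omega) (s.set (a-1).toNat a) hlen'
    rw [hset]
    refine ⟨hl, fun j hj => ?_⟩
    rw [hg j hj, pvGetD_set s (a-1).toNat j a (by omega)]
    split_ifs <;> first | rfl | omega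

theorem pvInner (n : Int) (hn : 7 ≤ n) :
    ∀ (bps : List Int), (∀ bp ∈ bps, 1 ≤ bp ∧ bp ≤ n-3) →
    ∀ (t : List Int), (n-1).toNat < t.length →
    bps.foldl (fun s2 bp =>
        if (n - bp - 1) * PySem.List.pyGetD s2 (bp-1) 0 > PySem.List.pyGetD s2 (n-1) 0
        then PySem.List.pySetD s2 (n-1) ((n - bp - 1) * PySem.List.pyGetD s2 (bp-1) 0) else s2) t
    = PySem.List.pySetD t (n-1)
        (pvImax (fun bp => (n - bp - 1) * PySem.List.pyGetD t (bp-1) 0) bps (PySem.List.pyGetD t (n-1) 0)) := by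
  intro bps
  induction bps with
  | nil =>
    intro _ t ht
    simp only [List.foldl_nil, pvImax, List.foldl_nil]
    rw [pvSetD_int t (n-1) _ (by omega), pvGetD_int t (n-1) (by omega),
      pvSet_getD_self t (n-1).toNat ht]
  | cons bp rest ih =>
    intro hb t ht
    have hbp := hb bp (List.mem_cons_self ..)
    have hbpt : (bp - 1).toNat ≠ (n-1).toNat := by omega
    simp only [List.foldl_cons]
    set c := (n - bp - 1) * PySem.List.pyGetD t (bp-1) 0 with hc
    set t' := if c > PySem.List.pyGetD t (n-1) 0 then PySem.List.pySetD t (n-1) c else t with ht'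
    have hlen' : (n-1).toNat < t'.length := by
      rw [ht']; split
      · rw [pvSetD_int t (n-1) _ (by omega), List.length_set]; exact ht
      · exact ht
    rw [ih (fun x hx => hb x (List.mem_cons_of_mem _ hx)) t' hlen']
    -- cells ≠ n-1 of t' agree with t; cell n-1 of t' is the updated running max
    have hcells : ∀ x : Int, 1 ≤ x → x ≤ n - 3 →
        PySem.List.pyGetD t' (x-1) 0 = PySem.List.pyGetD t (x-1) 0 := by
      intro x hx1 hx2
      rw [ht']; split
      · rw [pvSetD_int t (n-1) _ (by omega), pvGetD_int _ (x-1) (by omega),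
          pvGetD_int t (x-1) (by omega), pvGetD_set t (n-1).toNat (x-1).toNat c ht,
          if_neg (by omega)]
      · rfl
    have hcell_n : PySem.List.pyGetD t' (n-1) 0 =
        (if c > PySem.List.pyGetD t (n-1) 0 then c else PySem.List.pyGetD t (n-1) 0) := by
      rw [ht']; split
      · rw [pvSetD_int t (n-1) _ (by omega), pvGetD_int _ (n-1) (by omega),
          pvGetD_set t (n-1).toNat (n-1).toNat c ht, if_pos rfl]
      · rfl
    have hsets : PySem.List.pySetD t' (n-1)
        (pvImax (fun bp => (n - bp - 1) * PySem.List.pyGetD t' (bp-1) 0) rest (PySem.List.pyGetD t' (n-1) 0))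
        = PySem.List.pySetD t (n-1)
        (pvImax (fun bp => (n - bp - 1) * PySem.List.pyGetD t' (bp-1) 0) rest (PySem.List.pyGetD t' (n-1) 0)) := by
      rw [ht']; split
      · rw [pvSetD_int t (n-1) _ (by omega), pvSetD_int _ (n-1) _ (by omega),
          pvSetD_int t (n-1) _ (by omega), List.set_set]
      · rfl
    rw [hsets]
    congr 1
    rw [pvImax_congr _ (fun x hx => by
      rw [hcells x (hb x (List.mem_cons_of_mem _ hx)).1 (hb x (List.mem_cons_of_mem _ hx)).2]),
      hcell_n]
    simp only [pvImax, List.foldl_cons, ← hc]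

theorem pvOuter (N : Int) (h7 : 7 ≤ N) (s1 : List Int) (hlen1 : s1.length = N.toNat)
    (hsmall : ∀ j : Nat, j < N.toNat → (j:Int)+1 ≤ 6 → s1.getD j 0 = pvF (j+1)) :
    ∀ (k : Nat) (m : Int), 7 ≤ m → m ≤ N + 1 → (m - 7).toNat = k →
    (((PySem.List.pyRange 7 m 1).foldl (fun s n =>
        (PySem.List.pyRange (n-3) 0 (-1)).foldl
          (fun s2 bp =>
            if (n - bp - 1) * PySem.List.pyGetD s2 (bp-1) 0 > PySem.List.pyGetD s2 (n-1) 0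
            then PySem.List.pySetD s2 (n-1) ((n - bp - 1) * PySem.List.pyGetD s2 (bp-1) 0) else s2)
          (PySem.List.pySetD s (n-1) 0)) s1).length = N.toNat ∧
     ∀ j : Nat, j < N.toNat → ((j:Int)+1 ≤ 6 ∨ (j:Int)+1 < m) →
       ((PySem.List.pyRange 7 m 1).foldl (fun s n =>
        (PySem.List.pyRange (n-3) 0 (-1)).foldl
          (fun s2 bp =>
            if (n - bp - 1) * PySem.List.pyGetD s2 (bp-1) 0 > PySem.List.pyGetD s2 (n-1) 0
            then PySem.List.pySetD s2 (n-1) ((n - bp - 1) * PySem.List.pyGetD s2 (bp-1) 0) else s2)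
          (PySem.List.pySetD s (n-1) 0)) s1).getD j 0 = pvF (j+1)) := by
  intro k
  induction k with
  | zero =>
    intro m hm7 hmN hk
    have : m = 7 := by omega
    subst this
    rw [PySem.List.pyRange_one_eq_nil (by omega)]
    simp only [List.foldl_nil]
    exact ⟨hlen1, fun j hj hc => hsmall j hj (by omega)⟩
  | succ k ih =>
    intro m hm7 hmN hk
    set n := m - 1 with hn
    have hsplit : PySem.List.pyRange 7 m 1 = PySem.List.pyRange 7 n 1 ++ [n] := by
      rw [show m = n + 1 by omega, PySem.List.pyRange_one_succ_right (by omega)]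
    obtain ⟨hl, hg⟩ := ih n (by omega) (by omega) (by omega)
    rw [hsplit, List.foldl_append, List.foldl_cons, List.foldl_nil]
    set prev := (PySem.List.pyRange 7 n 1).foldl _ s1 with hprev
    have hn7 : 7 ≤ n := by omega
    have hnN : n ≤ N := by omega
    -- the write of 0 into cell n-1
    have hset0 : PySem.List.pySetD prev (n-1) 0 = prev.set (n-1).toNat 0 :=
      pvSetD_int prev (n-1) 0 (by omega)
    set t := prev.set (n-1).toNat 0 with ht
    have hlent : t.length = N.toNat := by rw [ht, List.length_set]; exact hl
    have hidx : (n-1).toNat < t.length := by omega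
    have hbps : ∀ bp ∈ PySem.List.pyRange (n-3) 0 (-1), 1 ≤ bp ∧ bp ≤ n-3 := by
      intro bp hbp
      rw [PySem.List.mem_pyRange_neg_one] at hbp
      omega
    rw [hset0, pvInner n hn7 _ hbps t hidx]
    -- initial running max is 0
    have hv0 : PySem.List.pyGetD t (n-1) 0 = 0 := by
      rw [pvGetD_int t (n-1) (by omega), ht, pvGetD_set prev (n-1).toNat (n-1).toNat 0 (by omega),
        if_pos rfl]
    -- candidate values read final cells of prev
    have hcand : ∀ bp ∈ PySem.List.pyRange (n-3) 0 (-1),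
        (n - bp - 1) * PySem.List.pyGetD t (bp-1) 0 = (n - bp - 1) * pvF bp.toNat := by
      intro bp hbp
      obtain ⟨h1, h2⟩ := hbps bp hbp
      rw [pvGetD_int t (bp-1) (by omega), ht,
        pvGetD_set prev (n-1).toNat (bp-1).toNat 0 (by omega), if_neg (by omega)]
      have := hg (bp-1).toNat (by omega) (by right; omega)
      rw [this]
      congr 2
      omega
    rw [hv0, pvImax_congr _ hcand]
    -- the computed max is pvF n.toNat
    have hV : pvImax (fun bp => (n - bp - 1) * pvF bp.toNat) (PySem.List.pyRange (n-3) 0 (-1)) 0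
        = pvF n.toNat := by
      rw [pvF_recur (by omega)]
      rw [pvImax_eq_of_mem_iff (L₂ := (((List.range (n.toNat-3)).map (· + 1)).map (fun b : Nat => (b : Int)))) 0 (by
        intro x
        rw [PySem.List.mem_pyRange_neg_one]
        simp only [List.mem_map, List.mem_range]
        constructor
        · rintro ⟨hx1, hx2⟩
          exact ⟨x.toNat, ⟨x.toNat - 1, by omega, by omega⟩, by omega⟩
        · rintro ⟨b, ⟨a, ha, rfl⟩, rfl⟩
          omega)]
      rw [pvImax_map]
      apply pvImax_congr
      intro b hb
      rw [mem_bps_iff (n := n.toNat) (by omega)] at hb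
      simp only [Int.toNat_natCast]
      congr 1
      omega
    rw [hV]
    constructor
    · rw [pvSetD_int t (n-1) _ (by omega), List.length_set]; exact hlent
    · intro j hj hc
      rw [pvSetD_int t (n-1) _ (by omega), pvGetD_set t (n-1).toNat j _ (by omega)]
      by_cases hje : j = (n-1).toNat
      · rw [if_pos hje]
        congr 1
        omega
      · rw [if_neg hje, ht, pvGetD_set prev (n-1).toNat j 0 (by omega), if_neg hje]
        exact hg j hj (by omega)

theorem A_eq_pvF (N : Int) (h7 : 7 ≤ N) : MaximumAsToPrint N = pvF N.toNat := by
  rw [MaximumAsToPrint, if_neg (by omega)]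
  simp only []
  obtain ⟨hl1, hg1⟩ := pvStage1 N h7 (N - 1).toNat 1 (by omega) (by omega)
    (List.replicate N.toNat 0) (by simp)
  have hsmall : ∀ j : Nat, j < N.toNat → (j:Int)+1 ≤ 6 →
      ((PySem.List.pyRange 1 N 1).foldl (fun s i => PySem.List.pySetD s (i-1) i)
        (List.replicate N.toNat 0)).getD j 0 = pvF (j+1) := by
    intro j hj hj6
    rw [hg1 j hj, if_pos (by omega), pvF_small (by omega)]
    push_cast
    ring
  obtain ⟨hl2, hg2⟩ := pvOuter N h7 _ hl1 hsmall (N - 6).toNat (N+1) (by omega) (by omega) (by omega)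
  rw [pvGetD_int _ (N-1) (by omega), hg2 (N-1).toNat (by omega) (by right; omega)]
  congr 1
  omega

-- ===== VERDICT (by name: the statement is the Claim_ definition above) =====
theorem MaximumAsToPrint_spec : Claim_equal_MaximumAsToPrint := by
  intro N _
  unfold Spec_MaximumAsToPrint
  by_cases h7 : 7 ≤ N
  · rw [A_eq_pvF N h7, B_eq_pvF N (by omega)]
  · rw [MaximumAsToPrint, MaximumAsToPrint_alt, if_pos (by omega), if_pos (by omega)]
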